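-- pv_equiv track=rewrite | github.com/tuonglan/movies-manager | tools/subtitle_tools.py | _get_sub_filename
-- ===== SOURCE A (Python) =====
-- def _get_sub_filename(files):
--     ass_file = None
--     for f in files:
--         if f.lower().endswith('.srt'):
--             return f
--         if f.lower().endswith('.ass'):
--             ass_file = f
--
--     if ass_file:
--         return ass_file
--     else:
--         raise Exception("Empty zipped sub file")
-- ===== SOURCE B (Python) =====
-- def _get_sub_filename(files):
--     srt = [f for f in files if f.lower().endswith('.srt')]
--     if srt:
--         return srt[0]
--     ass = [f for f in files if f.lower().endswith('.ass')]
--     if ass: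
--         return ass[-1]
--     raise Exception("Empty zipped sub file")
-- ===== Notes on version B (the rewrite author's own statement) =====
-- stated objective: idiomatic
-- what changed: Replaced the single early-exit scan carrying an ass_file accumulator by two independent filtering passes (first .srt match, else last .ass match) with direct first/last indexing.
import Mathlib
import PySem

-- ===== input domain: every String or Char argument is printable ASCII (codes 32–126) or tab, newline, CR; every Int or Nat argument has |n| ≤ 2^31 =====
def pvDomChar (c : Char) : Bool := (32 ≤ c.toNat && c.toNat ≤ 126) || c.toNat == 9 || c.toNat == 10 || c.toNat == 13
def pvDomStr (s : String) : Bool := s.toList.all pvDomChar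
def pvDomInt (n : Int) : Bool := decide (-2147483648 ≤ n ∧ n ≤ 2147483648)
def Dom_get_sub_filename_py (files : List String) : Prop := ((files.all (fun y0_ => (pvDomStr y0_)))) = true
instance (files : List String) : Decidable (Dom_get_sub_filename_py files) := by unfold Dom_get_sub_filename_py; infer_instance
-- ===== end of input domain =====

-- B replaces A's single early-exit scan with an accumulator by two independent
-- filtering passes (first .srt, else last .ass); objective: idiomatic, same cost.


-- ===== PORT A =====
-- f.lower().endswith('.srt')
def pvIsSrt (f : String) : Bool := PySem.Str.endswith (PySem.Str.lower f) ".srt"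
def pvIsAss (f : String) : Bool := PySem.Str.endswith (PySem.Str.lower f) ".ass"

-- the for-loop with the ass_file accumulator; the final `if ass_file:` truthiness
-- test and the raise (excluded by Pre_) become the terminal match ("" = raise).
def pvLoopA : List String → Option String → String
  | [], assFile =>
      match assFile with
      | some a => if a ≠ "" then a else ""   -- `if ass_file:` ; else-branch raises (outside Pre_)
      | none => ""                            -- raise Exception("Empty zipped sub file")
  | f :: rest, assFile =>
      if pvIsSrt f then f
      else if pvIsAss f then pvLoopA rest (some f)
      else pvLoopA rest assFile

def get_sub_filename_py (files : List String) : String := pvLoopA files none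

-- ===== PORT B =====
def get_sub_filename_py_alt (files : List String) : String :=
  let srt := files.filter pvIsSrt
  match srt with
  | f :: _ => f
  | [] =>
      let ass := files.filter pvIsAss
      match ass.getLast? with
      | some a => a
      | none => ""                            -- raise (outside Pre_)

-- ===== PRECONDITION & SPEC =====
-- Pre_ excludes exactly the inputs where A raises Exception("Empty zipped sub file"):
-- no element ends (case-insensitively) with '.srt' or '.ass'.
def Pre_get_sub_filename_py (files : List String) : Prop :=
  (files.any (fun f => pvIsSrt f || pvIsAss f)) = true
instance (files : List String) : Decidable (Pre_get_sub_filename_py files) := by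
  unfold Pre_get_sub_filename_py; infer_instance
def pvWitness_get_sub_filename_py : List String := (["movie.txt", "movie.ASS", "movie.srt"])

def Spec_get_sub_filename_py (files : List String) (out : String) : Prop := out = get_sub_filename_py_alt files
instance (files : List String) (out : String) : Decidable (Spec_get_sub_filename_py files out) := by unfold Spec_get_sub_filename_py; infer_instance

-- ===== CLAIM (what is proved, stated in full; the proofs are below) =====
def Claim_equal_get_sub_filename_py : Prop := ∀ (files : List String), Dom_get_sub_filename_py files → Pre_get_sub_filename_py files → Spec_get_sub_filename_py files (get_sub_filename_py files)

-- ===== LEMMAS AND PROOFS =====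

-- a string ending (case-insensitively) in '.ass' is nonempty, so Python's `if ass_file:` is true
theorem pvIsAss_ne_empty {f : String} (h : pvIsAss f = true) : f ≠ "" := by
  rintro rfl; revert h; decide

-- loop characterisation of A's scan in terms of B's two filters
theorem pvLoopA_char (files : List String) (acc : Option String) :
    pvLoopA files acc =
      match files.filter pvIsSrt with
      | f :: _ => f
      | [] =>
          match (files.filter pvIsAss).getLast? with
          | some a => a
          | none =>
              match acc with
              | some a => if a ≠ "" then a else ""
              | none => "" := by
  induction files generalizing acc with
  | nil => rfl
  | cons f rest ih =>
    by_cases hs : pvIsSrt f = true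
    · simp [pvLoopA, hs, List.filter_cons_of_pos hs]
    · have hs' : pvIsSrt f = false := by simpa using hs
      by_cases ha : pvIsAss f = true
      · rw [show pvLoopA (f :: rest) acc = pvLoopA rest (some f) by
            simp [pvLoopA, hs', ha], ih (some f)]
        rw [List.filter_cons_of_neg (by simp [hs']), List.filter_cons_of_pos ha]
        cases hfil : rest.filter pvIsSrt with
        | cons g l => simp
        | nil =>
          cases hl : rest.filter pvIsAss with
          | nil => simp [pvIsAss_ne_empty ha]
          | cons g l =>
            cases hg : (g :: l).getLast? with
            | some a => simp [List.getLast?_cons_cons, hg]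
            | none => simp at hg
      · have ha' : pvIsAss f = false := by simpa using ha
        rw [show pvLoopA (f :: rest) acc = pvLoopA rest acc by
            simp [pvLoopA, hs', ha'], ih acc,
          List.filter_cons_of_neg (by simp [hs']),
          List.filter_cons_of_neg (by simp [ha'])]

-- ===== VERDICT (by name: the statement is the Claim_ definition above) =====
theorem get_sub_filename_py_spec : Claim_equal_get_sub_filename_py := by
  intro files _ _
  unfold Spec_get_sub_filename_py get_sub_filename_py get_sub_filename_py_alt
  rw [pvLoopA_char files none]
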